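-- pv_equiv track=rewrite | github.com/MarcelloAtInfor/InforOS-Automation-Toolkit | tools/commands/memory_manager.py | _build_match_windows
-- ===== SOURCE A (Python) =====
-- def _build_match_windows(match_lines: list[int], context_lines: int) -> list[tuple[int, int]]:
--     if not match_lines:
--         return []
--     windows: list[tuple[int, int]] = []
--     start = match_lines[0]
--     end = match_lines[0]
--     for line_no in match_lines[1:]:
--         if line_no <= end + (context_lines * 2) + 1:
--             end = line_no
--             continue
--         windows.append((start, end))
--         start = line_no
--         end = line_no
--     windows.append((start, end))
--     return windows
-- ===== SOURCE B (Python) =====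
-- def _build_match_windows(match_lines: list[int], context_lines: int) -> list[tuple[int, int]]:
--     if not match_lines:
--         return []
--     threshold = context_lines * 2 + 1
--     # adjacent pairs where the gap is too large to merge: each marks a window boundary
--     gaps = [(a, b) for a, b in zip(match_lines, match_lines[1:]) if b > a + threshold]
--     starts = [match_lines[0]] + [b for _, b in gaps]
--     ends = [a for a, _ in gaps] + [match_lines[-1]]
--     return list(zip(starts, ends))
-- ===== Notes on version B (the rewrite author's own statement) =====
-- stated objective: alternative
-- what changed: Replaces A's single stateful merge loop (start/end accumulator with append-on-break) by a two-pass boundary decomposition: one pass over adjacent pairs collects the break gaps, then window starts and ends are read off the gap list and zipped.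
import Mathlib
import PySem

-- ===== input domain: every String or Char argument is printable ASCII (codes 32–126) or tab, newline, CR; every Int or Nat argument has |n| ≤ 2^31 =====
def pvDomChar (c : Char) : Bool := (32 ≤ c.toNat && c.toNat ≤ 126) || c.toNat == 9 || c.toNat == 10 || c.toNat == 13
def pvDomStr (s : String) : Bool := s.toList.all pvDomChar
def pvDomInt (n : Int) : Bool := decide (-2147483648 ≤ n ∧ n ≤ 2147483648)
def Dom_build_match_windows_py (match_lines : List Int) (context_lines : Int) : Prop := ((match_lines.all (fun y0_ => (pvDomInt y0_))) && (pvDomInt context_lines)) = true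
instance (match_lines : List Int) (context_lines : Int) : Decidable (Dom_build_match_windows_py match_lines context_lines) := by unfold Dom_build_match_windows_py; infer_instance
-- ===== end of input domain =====

-- B replaces A's single stateful merge loop by a two-pass boundary decomposition
-- (collect the too-large adjacent gaps, then zip the starts with the ends): alternative, same cost.

-- ===== PORT A =====
-- A's for-loop over match_lines[1:] as the obvious structural recursion over the
-- same state (windows, start, end); branches in source order.
def pvALoop (context_lines : Int) (windows : List (Int × Int)) (start en : Int) :
    List Int → List (Int × Int) × Int × Int
  | [] => (windows, start, en)
  | line_no :: rest =>
    if line_no ≤ en + context_lines * 2 + 1 then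
      pvALoop context_lines windows start line_no rest
    else
      pvALoop context_lines (windows ++ [(start, en)]) line_no line_no rest

def build_match_windows_py (match_lines : List Int) (context_lines : Int) : List (Int × Int) :=
  match match_lines with
  | [] => []
  | x :: rest =>
    let r := pvALoop context_lines [] x x rest
    r.1 ++ [(r.2.1, r.2.2)]

-- ===== PORT B =====
-- zip(match_lines, match_lines[1:]) → List.zip (x :: rest) rest; the filtering
-- comprehensions → filter + map; match_lines[-1] → rest.getLastD x (list nonempty here).
def build_match_windows_py_alt (match_lines : List Int) (context_lines : Int) : List (Int × Int) :=
  match match_lines with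
  | [] => []
  | x :: rest =>
    let threshold := context_lines * 2 + 1
    let gaps := (List.zip (x :: rest) rest).filter (fun p => p.1 + threshold < p.2)
    let starts := x :: gaps.map (·.2)
    let ends := gaps.map (·.1) ++ [rest.getLastD x]
    List.zip starts ends

-- ===== PRECONDITION & SPEC =====
def Spec_build_match_windows_py (match_lines : List Int) (context_lines : Int) (out : List (Int × Int)) : Prop := out = build_match_windows_py_alt match_lines context_lines
instance (match_lines : List Int) (context_lines : Int) (out : List (Int × Int)) : Decidable (Spec_build_match_windows_py match_lines context_lines out) := by unfold Spec_build_match_windows_py; infer_instance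

-- ===== CLAIM (what is proved, stated in full; the proofs are below) =====
def Claim_equal_build_match_windows_py : Prop := ∀ (match_lines : List Int) (context_lines : Int), Dom_build_match_windows_py match_lines context_lines → Spec_build_match_windows_py match_lines context_lines (build_match_windows_py match_lines context_lines)

-- ===== LEMMAS AND PROOFS =====

-- Invariant for A's loop: its emitted windows are exactly B's zip of the group
-- starts with the group ends, where `en` plays the role of the previous element.
lemma pvALoop_eq (c : Int) :
    ∀ (rest : List Int) (start en : Int) (ws : List (Int × Int)),
    (pvALoop c ws start en rest).1 ++ [((pvALoop c ws start en rest).2.1, (pvALoop c ws start en rest).2.2)]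
    = ws ++ List.zip
        (start :: ((List.zip (en :: rest) rest).filter (fun p => p.1 + (c * 2 + 1) < p.2)).map (·.2))
        (((List.zip (en :: rest) rest).filter (fun p => p.1 + (c * 2 + 1) < p.2)).map (·.1)
          ++ [rest.getLastD en]) := by
  intro rest
  induction rest with
  | nil => intro start en ws; simp [pvALoop]
  | cons y ys ih =>
    intro start en ws
    by_cases h : y ≤ en + c * 2 + 1
    · have hc : ¬ (en + (c * 2 + 1) < y) := by omega
      simp only [pvALoop, if_pos h, List.zip_cons_cons, List.filter_cons,
        decide_eq_true_eq, hc, if_false, List.getLastD_cons]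
      exact ih start y ws
    · have hc : en + (c * 2 + 1) < y := by omega
      simp only [pvALoop, if_neg h, List.zip_cons_cons, List.filter_cons,
        decide_eq_true_eq, hc, if_true, List.map_cons, List.getLastD_cons]
      rw [ih y y (ws ++ [(start, en)])]
      simp [List.zip_cons_cons]

-- ===== VERDICT (by name: the statement is the Claim_ definition above) =====
theorem build_match_windows_py_spec : Claim_equal_build_match_windows_py := by
  intro match_lines context_lines _
  unfold Spec_build_match_windows_py build_match_windows_py build_match_windows_py_alt
  cases match_lines with
  | nil => rfl
  | cons x rest =>
    simpa using pvALoop_eq context_lines rest x x []
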